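-- pv_equiv track=rewrite | github.com/shohei-miyoshi/lecture_craft | backend/experiments/scripts/step9_phase1.py | pick_baseline_for_group
-- ===== SOURCE A (Python) =====
-- from typing import Any, Dict, List, Optional, Tuple, Set
--
-- def pick_baseline_for_group(cond_order: List[str], cond_ids: List[str], baseline_ids: Set[str]) -> Optional[str]:
--     s = set(cond_ids)
--     inter = [c for c in cond_order if c in s and c in baseline_ids]
--     if inter:
--         return inter[0]
--     fallback = [c for c in cond_order if c in s and ("baseline" in c.lower())]
--     if fallback:
--         return fallback[0]
--     return None
-- ===== SOURCE B (Python) =====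
-- def pick_baseline_for_group(cond_order, cond_ids, baseline_ids):
--     s = set(cond_ids)
--     fallback = None
--     for c in cond_order:
--         if c in s:
--             if c in baseline_ids:
--                 return c
--             if fallback is None and "baseline" in c.lower():
--                 fallback = c
--     return fallback
-- ===== Notes on version B (the rewrite author's own statement) =====
-- stated objective: alternative
-- what changed: Replaced A's two full comprehension scans over cond_order (one for baseline intersection, one for name-based fallback) by a single loop that returns immediately on a baseline hit and carries a first-fallback accumulator, so the list is traversed once and can stop early.
import Mathlib
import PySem

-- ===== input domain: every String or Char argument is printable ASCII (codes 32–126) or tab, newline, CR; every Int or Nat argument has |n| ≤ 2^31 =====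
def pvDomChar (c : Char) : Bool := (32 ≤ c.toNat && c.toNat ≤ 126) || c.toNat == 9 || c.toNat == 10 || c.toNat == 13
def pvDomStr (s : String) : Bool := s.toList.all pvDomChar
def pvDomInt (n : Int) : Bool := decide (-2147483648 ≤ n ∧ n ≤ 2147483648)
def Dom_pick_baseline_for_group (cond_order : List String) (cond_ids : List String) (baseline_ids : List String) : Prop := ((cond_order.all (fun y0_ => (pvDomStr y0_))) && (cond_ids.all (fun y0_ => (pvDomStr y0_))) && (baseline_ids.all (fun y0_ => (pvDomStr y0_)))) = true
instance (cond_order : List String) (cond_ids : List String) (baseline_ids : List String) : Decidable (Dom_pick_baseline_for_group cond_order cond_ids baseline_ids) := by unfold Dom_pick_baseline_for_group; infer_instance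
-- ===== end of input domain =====

-- B fuses A's two comprehension scans into one early-returning loop with a fallback accumulator (objective: alternative, same cost).

-- ===== PORT A =====
-- literal port: s = set(cond_ids); two list-comprehension filters; return head of the first non-empty one
def pick_baseline_for_group (cond_order : List String) (cond_ids : List String) (baseline_ids : List String) : Option String :=
  let s : PySem.Set String := PySem.Set.ofList cond_ids
  let inter := cond_order.filter (fun c => PySem.Set.contains s c && baseline_ids.contains c)
  match inter with
  | x :: _ => some x
  | [] =>
    let fallback := cond_order.filter (fun c => PySem.Set.contains s c && PySem.Str.isIn "baseline" (PySem.Str.lower c))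
    match fallback with
    | x :: _ => some x
    | [] => none

-- ===== PORT B =====
-- single pass: immediate return on a baseline hit, first name-based candidate kept as fallback
def pbfgLoop (s : PySem.Set String) (baseline_ids : List String) : List String → Option String → Option String
  | [], fb => fb
  | c :: rest, fb =>
    if PySem.Set.contains s c then
      if baseline_ids.contains c then some c
      else if fb == none && PySem.Str.isIn "baseline" (PySem.Str.lower c) then
        pbfgLoop s baseline_ids rest (some c)
      else pbfgLoop s baseline_ids rest fb
    else pbfgLoop s baseline_ids rest fb

def pick_baseline_for_group_alt (cond_order : List String) (cond_ids : List String) (baseline_ids : List String) : Option String :=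
  pbfgLoop (PySem.Set.ofList cond_ids) baseline_ids cond_order none

-- ===== PRECONDITION & SPEC =====
def Spec_pick_baseline_for_group (cond_order : List String) (cond_ids : List String) (baseline_ids : List String) (out : Option String) : Prop := out = pick_baseline_for_group_alt cond_order cond_ids baseline_ids
instance (cond_order : List String) (cond_ids : List String) (baseline_ids : List String) (out : Option String) : Decidable (Spec_pick_baseline_for_group cond_order cond_ids baseline_ids out) := by unfold Spec_pick_baseline_for_group; infer_instance

-- ===== CLAIM (what is proved, stated in full; the proofs are below) =====
def Claim_equal_pick_baseline_for_group : Prop := ∀ (cond_order : List String) (cond_ids : List String) (baseline_ids : List String), Dom_pick_baseline_for_group cond_order cond_ids baseline_ids → Spec_pick_baseline_for_group cond_order cond_ids baseline_ids (pick_baseline_for_group cond_order cond_ids baseline_ids)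

-- ===== LEMMAS AND PROOFS =====

-- B's loop answers: first element passing the intersection test wins; otherwise
-- the incoming fallback; otherwise the first element passing the name test.
theorem pbfgLoop_eq (s : PySem.Set String) (bi : List String) (l : List String) (fb : Option String) :
    pbfgLoop s bi l fb =
      match l.filter (fun c => PySem.Set.contains s c && bi.contains c) with
      | x :: _ => some x
      | [] => fb.orElse (fun _ => (l.filter (fun c => PySem.Set.contains s c && PySem.Str.isIn "baseline" (PySem.Str.lower c))).head?) := by
  induction l generalizing fb with
  | nil => cases fb <;> rfl
  | cons c rest ih =>
    rw [List.filter_cons, List.filter_cons]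
    show (if PySem.Set.contains s c then
            if bi.contains c then some c
            else if fb == none && PySem.Str.isIn "baseline" (PySem.Str.lower c) then
              pbfgLoop s bi rest (some c)
            else pbfgLoop s bi rest fb
          else pbfgLoop s bi rest fb) = _
    by_cases hs : PySem.Set.contains s c = true
    · by_cases hb : bi.contains c = true
      · rw [if_pos hs, if_pos hb, if_pos (by rw [hs, hb]; rfl)]
      · rw [if_pos hs, if_neg hb, if_neg (by rw [Bool.and_eq_true]; exact fun h => hb h.2) (c := (PySem.Set.contains s c && bi.contains c) = true)]
        by_cases hn : PySem.Str.isIn "baseline" (PySem.Str.lower c) = true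
        · rw [if_pos (by rw [hs, hn]; rfl) (c := (PySem.Set.contains s c && PySem.Str.isIn "baseline" (PySem.Str.lower c)) = true)]
          cases fb with
          | none =>
            rw [if_pos (by rw [hn]; rfl) (c := (((none : Option String) == none) && PySem.Str.isIn "baseline" (PySem.Str.lower c)) = true), ih]
            cases hr : rest.filter (fun c => PySem.Set.contains s c && bi.contains c) with
            | cons x t => rfl
            | nil => rfl
          | some y =>
            rw [if_neg (by simp) (c := ((some y == none) && PySem.Str.isIn "baseline" (PySem.Str.lower c)) = true), ih]
            cases hr : rest.filter (fun c => PySem.Set.contains s c && bi.contains c) with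
            | cons x t => rfl
            | nil => rfl
        · rw [if_neg (by rw [Bool.and_eq_true]; exact fun h => hn h.2) (c := ((fb == none) && PySem.Str.isIn "baseline" (PySem.Str.lower c)) = true),
              if_neg (by rw [Bool.and_eq_true]; exact fun h => hn h.2) (c := (PySem.Set.contains s c && PySem.Str.isIn "baseline" (PySem.Str.lower c)) = true)]
          exact ih fb
    · rw [if_neg hs, if_neg (by rw [Bool.and_eq_true]; exact fun h => hs h.1) (c := (PySem.Set.contains s c && bi.contains c) = true),
          if_neg (by rw [Bool.and_eq_true]; exact fun h => hs h.1) (c := (PySem.Set.contains s c && PySem.Str.isIn "baseline" (PySem.Str.lower c)) = true)]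
      exact ih fb

-- ===== VERDICT (by name: the statement is the Claim_ definition above) =====
theorem pick_baseline_for_group_spec : Claim_equal_pick_baseline_for_group := by
  intro co ci bi _
  simp only [Spec_pick_baseline_for_group, pick_baseline_for_group, pick_baseline_for_group_alt]
  rw [pbfgLoop_eq]
  cases h1 : co.filter (fun c => PySem.Set.contains (PySem.Set.ofList ci) c && bi.contains c) with
  | cons x t => rfl
  | nil =>
    cases h2 : co.filter (fun c => PySem.Set.contains (PySem.Set.ofList ci) c && PySem.Str.isIn "baseline" (PySem.Str.lower c)) with
    | cons y t => rfl
    | nil => rfl
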